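-- pv_equiv track=rewrite | github.com/NikitaNRus/Python | Seminar/Sem6-3.py | Pares
-- ===== SOURCE A (Python) =====
-- def Pares (list):
--     counter = 0
--     for i in range(len(list)):
--         for j in range (len(list)-i-1):
--             if list[i]==list[j+i+1]:
--                 counter+=1
--                 break
--     return counter
-- ===== SOURCE B (Python) =====
-- def Pares(list):
--     counter = 0
--     seen = set()
--     for x in reversed(list):
--         if x in seen:
--             counter += 1
--         seen.add(x)
--     return counter
-- ===== Notes on version B (the rewrite author's own statement) =====
-- stated objective: faster
-- what changed: Replaced the nested forward scan (for each element, scan the rest of the list for a later equal element) with a single backward pass that maintains a set of values already seen to the right, counting an element iff it is in that set.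
import Mathlib
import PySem

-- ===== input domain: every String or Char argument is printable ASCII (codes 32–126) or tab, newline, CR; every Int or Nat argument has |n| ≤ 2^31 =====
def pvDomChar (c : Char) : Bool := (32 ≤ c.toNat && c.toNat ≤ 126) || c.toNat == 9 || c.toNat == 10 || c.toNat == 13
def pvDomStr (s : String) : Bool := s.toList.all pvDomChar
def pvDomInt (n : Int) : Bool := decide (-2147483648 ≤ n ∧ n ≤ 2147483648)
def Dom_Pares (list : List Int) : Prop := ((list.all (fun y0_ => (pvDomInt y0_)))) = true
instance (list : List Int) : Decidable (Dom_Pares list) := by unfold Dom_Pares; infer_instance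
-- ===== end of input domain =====

-- B replaces A's O(n^2) nested forward scan with one backward pass keeping a set of values already seen to the right (objective: faster).

-- ===== PORT A =====
-- inner 'for j in range(len(list)-i-1): if list[i]==list[j+i+1]: counter+=1; break' — returns the amount added to counter
def paresInner (l : List Int) (i : Int) : List Int → Int
  | [] => 0
  | j :: rest =>
      if PySem.List.pyGetD l i 0 = PySem.List.pyGetD l (j + i + 1) 0 then 1
      else paresInner l i rest

def Pares (list : List Int) : Int :=
  (PySem.List.pyRange 0 list.length 1).foldl
    (fun counter i =>
      counter + paresInner list i (PySem.List.pyRange 0 ((list.length : Int) - i - 1) 1)) 0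

-- ===== PORT B =====
def Pares_alt (list : List Int) : Int :=
  (list.reverse.foldl
    (fun (st : Int × PySem.Set Int) x =>
      ((if PySem.Set.contains st.2 x then st.1 + 1 else st.1), PySem.Set.add st.2 x))
    (0, PySem.Set.empty)).1

-- ===== PRECONDITION & SPEC =====
def Spec_Pares (list : List Int) (out : Int) : Prop := out = Pares_alt list
instance (list : List Int) (out : Int) : Decidable (Spec_Pares list out) := by unfold Spec_Pares; infer_instance

-- ===== CLAIM (what is proved, stated in full; the proofs are below) =====
def Claim_equal_Pares : Prop := ∀ (list : List Int), Dom_Pares list → Spec_Pares list (Pares list)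

-- ===== LEMMAS AND PROOFS =====

-- common spec: number of elements having a later equal element
def cntDup : List Int → Int
  | [] => 0
  | x :: xs => (if x ∈ xs then 1 else 0) + cntDup xs

-- counter contribution of processing xs (in reverse) when the seen set already holds s
def cntS (s : List Int) : List Int → Int
  | [] => 0
  | x :: xs => cntS s xs + (if x ∈ s ∨ x ∈ xs then 1 else 0)

lemma cntS_nil_eq (l : List Int) : cntS [] l = cntDup l := by
  induction l with
  | nil => rfl
  | cons x xs ih => simp [cntS, cntDup, ih]; omega

lemma set_contains_iff (s : PySem.Set Int) (x : Int) :
    PySem.Set.contains s x = true ↔ x ∈ s := by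
  rw [PySem.Set.contains]
  exact List.contains_iff_mem

lemma alt_loop (xs : List Int) (c : Int) (s : PySem.Set Int) :
    (xs.foldr
      (fun x (st : Int × PySem.Set Int) =>
        ((if PySem.Set.contains st.2 x then st.1 + 1 else st.1), PySem.Set.add st.2 x))
      (c, s)).1 = c + cntS s xs ∧
    ∀ a : Int, a ∈ (xs.foldr
      (fun x (st : Int × PySem.Set Int) =>
        ((if PySem.Set.contains st.2 x then st.1 + 1 else st.1), PySem.Set.add st.2 x))
      (c, s)).2 ↔ a ∈ s ∨ a ∈ xs := by
  induction xs with
  | nil => simp [cntS]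
  | cons y ys ih =>
      obtain ⟨h1, h2⟩ := ih
      simp only [List.foldr_cons]
      refine ⟨?_, ?_⟩
      · by_cases hy : y ∈ s ∨ y ∈ ys
        · have hc : PySem.Set.contains (ys.foldr
              (fun x (st : Int × PySem.Set Int) =>
                ((if PySem.Set.contains st.2 x then st.1 + 1 else st.1), PySem.Set.add st.2 x))
              (c, s)).2 y = true := (set_contains_iff _ y).mpr ((h2 y).mpr hy)
          simp only [hc, if_true, h1, cntS, if_pos hy]
          ring
        · have hc : PySem.Set.contains (ys.foldr
              (fun x (st : Int × PySem.Set Int) =>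
                ((if PySem.Set.contains st.2 x then st.1 + 1 else st.1), PySem.Set.add st.2 x))
              (c, s)).2 y = false := by
            rw [Bool.eq_false_iff]
            intro hct
            exact hy ((h2 y).mp ((set_contains_iff _ y).mp hct))
          simp only [hc, if_false, Bool.false_eq_true, h1, cntS, if_neg hy]
          ring
      · intro a
        simp only [PySem.Set.mem_add, h2 a, List.mem_cons]
        tauto

lemma alt_eq_cntDup (l : List Int) : Pares_alt l = cntDup l := by
  unfold Pares_alt
  rw [List.foldl_reverse]
  have h := (alt_loop l 0 PySem.Set.empty).1
  rw [h, Int.zero_add]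
  exact cntS_nil_eq l

-- A's inner loop returns 1 iff some later index holds an equal element
lemma paresInner_eq (l : List Int) (i : Int) (js : List Int) :
    paresInner l i js =
      if (∃ j ∈ js, PySem.List.pyGetD l i 0 = PySem.List.pyGetD l (j + i + 1) 0) then 1 else 0 := by
  induction js with
  | nil => simp [paresInner]
  | cons j rest ih =>
      by_cases h : PySem.List.pyGetD l i 0 = PySem.List.pyGetD l (j + i + 1) 0
      · simp [paresInner, h]
      · simp only [paresInner, if_neg h, ih]
        have hiff : (∃ j' ∈ j :: rest, PySem.List.pyGetD l i 0 = PySem.List.pyGetD l (j' + i + 1) 0) ↔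
            (∃ j' ∈ rest, PySem.List.pyGetD l i 0 = PySem.List.pyGetD l (j' + i + 1) 0) := by
          constructor
          · rintro ⟨j', hj', he⟩
            rcases List.mem_cons.mp hj' with rfl | hm
            · exact absurd he h
            · exact ⟨j', hm, he⟩
          · rintro ⟨j', hm, he⟩
            exact ⟨j', List.mem_cons_of_mem _ hm, he⟩
        simp only [hiff]

lemma inner_range_eq (l : List Int) (k : Nat) (_hk : k < l.length) :
    paresInner l (k : Int) (PySem.List.pyRange 0 ((l.length : Int) - (k : Int) - 1) 1) =
      if l.getD k 0 ∈ l.drop (k + 1) then 1 else 0 := by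
  rw [paresInner_eq]
  congr 1
  simp only [eq_iff_iff]
  constructor
  · rintro ⟨j, hj, he⟩
    have hjr := (PySem.List.mem_pyRange_one).mp hj
    have h0 : (0:Int) ≤ j := hjr.1
    have hlt : j + (k:Int) + 1 < (l.length : Int) := by omega
    have hnn : (0:Int) ≤ j + (k:Int) + 1 := by omega
    rw [PySem.List.pyGetD_natCast] at he
    rw [PySem.List.pyGetD_eq_getElem l 0 hnn hlt] at he
    rw [List.mem_iff_getElem?]
    refine ⟨j.toNat, ?_⟩
    rw [List.getElem?_drop]
    have hb : k + 1 + j.toNat < l.length := by omega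
    rw [List.getElem?_eq_getElem hb]
    rw [show l[k + 1 + j.toNat] = l[(j + (k:Int) + 1).toNat] from getElem_congr_idx (by omega)]
    rw [← he]
  · intro hmem
    rw [List.mem_iff_getElem?] at hmem
    rcases hmem with ⟨m, hm⟩
    rw [List.getElem?_drop] at hm
    obtain ⟨hb, heq⟩ := List.getElem?_eq_some_iff.mp hm
    have hlt : ((m:Int) + (k:Int) + 1) < (l.length : Int) := by omega
    have hnn : (0:Int) ≤ (m:Int) + (k:Int) + 1 := by omega
    refine ⟨(m : Int), ?_, ?_⟩
    · rw [PySem.List.mem_pyRange_one]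
      constructor
      · exact Int.natCast_nonneg m
      · omega
    · rw [PySem.List.pyGetD_natCast]
      rw [PySem.List.pyGetD_eq_getElem l 0 hnn hlt]
      rw [← heq]
      exact (getElem_congr_idx (by omega)).symm

-- sum form of A
lemma a_eq_sum (l : List Int) :
    Pares l = ((List.range l.length).map
      (fun k => if l.getD k 0 ∈ l.drop (k + 1) then (1:Int) else 0)).sum := by
  unfold Pares
  rw [PySem.List.foldl_add]
  rw [PySem.List.pyRange_zero_nat]
  rw [List.map_map]
  simp only [Function.comp_def]
  have : ∀ k ∈ List.range l.length,
      paresInner l (k : Int) (PySem.List.pyRange 0 ((l.length : Int) - (k : Int) - 1) 1) =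
        if l.getD k 0 ∈ l.drop (k + 1) then (1:Int) else 0 := by
    intro k hk
    exact inner_range_eq l k (List.mem_range.mp hk)
  rw [List.map_congr_left this]
  omega

lemma sum_eq_cntDup (l : List Int) :
    ((List.range l.length).map
      (fun k => if l.getD k 0 ∈ l.drop (k + 1) then (1:Int) else 0)).sum = cntDup l := by
  induction l with
  | nil => simp [cntDup]
  | cons x xs ih =>
      rw [List.length_cons, List.range_succ_eq_map, List.map_cons, List.map_map]
      simp only [Function.comp_def, List.getD_cons_succ, List.drop_succ_cons, List.getD_cons_zero,
        List.drop_zero, List.sum_cons]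
      rw [ih]
      rfl

-- ===== VERDICT (by name: the statement is the Claim_ definition above) =====
theorem Pares_spec : Claim_equal_Pares := by
  intro l _
  unfold Spec_Pares
  rw [a_eq_sum, sum_eq_cntDup, alt_eq_cntDup]
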